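-- pv_equiv track=rewrite | github.com/dkarpelevich/test-checkio | ESCHER/compass-map-and-spyglass.py | navigation
-- ===== SOURCE A (Python) =====
-- def dist(a, b):
--     return max(abs(a[0] - b[0]), abs(a[1] - b[1]))
--
-- def navigation(seaside):
--     Y = C = M = S = [0, 0]
--     for row, column in list(enumerate(seaside)):
--         if 'Y' in column:
--             Y = [row, column.index('Y')]
--         if 'C' in column:
--             C = [row, column.index('C')]
--         if 'M' in column:
--             M = [row, column.index('M')]
--         if 'S' in column:
--             S = [row, column.index('S')]
--     YC = dist(Y, C)
--     YM = dist(Y, M)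
--     YS = dist(Y, S)
--     return YC + YM + YS
-- ===== SOURCE B (Python) =====
-- def dist(a, b):
--     return max(abs(a[0] - b[0]), abs(a[1] - b[1]))
--
-- def find(seaside, ch):
--     pos = [0, 0]
--     for row, column in enumerate(seaside):
--         if ch in column:
--             pos = [row, column.index(ch)]
--     return pos
--
-- def navigation(seaside):
--     y = find(seaside, 'Y')
--     c = find(seaside, 'C')
--     m = find(seaside, 'M')
--     s = find(seaside, 'S')
--     return dist(y, c) + dist(y, m) + dist(y, s)
-- ===== Notes on version B (the rewrite author's own statement) =====
-- stated objective: simpler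
-- what changed: A's single loop threading four marker positions through one combined state is replaced by a reusable find(seaside, ch) helper called once per marker (four independent scans), keeping the same last-overwrite and [0,0]-default semantics.
import Mathlib
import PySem

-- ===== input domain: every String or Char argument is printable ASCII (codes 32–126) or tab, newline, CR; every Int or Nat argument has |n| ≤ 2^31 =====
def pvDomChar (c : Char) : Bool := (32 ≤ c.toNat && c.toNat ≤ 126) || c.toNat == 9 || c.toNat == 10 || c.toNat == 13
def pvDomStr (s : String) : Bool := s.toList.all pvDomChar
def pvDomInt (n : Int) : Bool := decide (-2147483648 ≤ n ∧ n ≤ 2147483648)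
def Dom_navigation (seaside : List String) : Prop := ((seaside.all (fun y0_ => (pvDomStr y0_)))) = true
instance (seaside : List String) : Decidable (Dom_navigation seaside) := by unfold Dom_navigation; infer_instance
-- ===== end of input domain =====

-- B replaces A's single loop over one four-marker state by a reusable per-marker
-- find helper called four times (simpler decomposition, same cost).

-- ===== PORT A =====
def distP (a b : Int × Int) : Int := max |a.1 - b.1| |a.2 - b.2|

def navStep (st : (Int × Int) × (Int × Int) × (Int × Int) × (Int × Int))
    (rc : Int × String) : (Int × Int) × (Int × Int) × (Int × Int) × (Int × Int) :=
  let Y := if PySem.Str.isIn "Y" rc.2 then (rc.1, PySem.Str.find rc.2 "Y") else st.1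
  let C := if PySem.Str.isIn "C" rc.2 then (rc.1, PySem.Str.find rc.2 "C") else st.2.1
  let M := if PySem.Str.isIn "M" rc.2 then (rc.1, PySem.Str.find rc.2 "M") else st.2.2.1
  let S := if PySem.Str.isIn "S" rc.2 then (rc.1, PySem.Str.find rc.2 "S") else st.2.2.2
  (Y, C, M, S)

def navigation (seaside : List String) : Int :=
  let st := (PySem.List.enumerate seaside 0).foldl navStep ((0, 0), (0, 0), (0, 0), (0, 0))
  let yc := distP st.1 st.2.1
  let ym := distP st.1 st.2.2.1
  let ys := distP st.1 st.2.2.2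
  yc + ym + ys

-- ===== PORT B =====
def findStep (ch : String) (pos : Int × Int) (rc : Int × String) : Int × Int :=
  if PySem.Str.isIn ch rc.2 then (rc.1, PySem.Str.find rc.2 ch) else pos

def findMark (seaside : List String) (ch : String) : Int × Int :=
  (PySem.List.enumerate seaside 0).foldl (findStep ch) (0, 0)

def navigation_alt (seaside : List String) : Int :=
  let y := findMark seaside "Y"
  let c := findMark seaside "C"
  let m := findMark seaside "M"
  let s := findMark seaside "S"
  distP y c + distP y m + distP y s

-- ===== PRECONDITION & SPEC =====
def Spec_navigation (seaside : List String) (out : Int) : Prop := out = navigation_alt seaside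
instance (seaside : List String) (out : Int) : Decidable (Spec_navigation seaside out) := by unfold Spec_navigation; infer_instance

-- ===== CLAIM (what is proved, stated in full; the proofs are below) =====
def Claim_equal_navigation : Prop := ∀ (seaside : List String), Dom_navigation seaside → Spec_navigation seaside (navigation seaside)

-- ===== LEMMAS AND PROOFS =====

-- A's combined fold over the four-marker state is the product of B's four independent folds.
theorem foldl_navStep_eq (l : List (Int × String))
    (y c m s : Int × Int) :
    l.foldl navStep (y, c, m, s) =
      (l.foldl (findStep "Y") y, l.foldl (findStep "C") c,
       l.foldl (findStep "M") m, l.foldl (findStep "S") s) := by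
  induction l generalizing y c m s with
  | nil => rfl
  | cons hd tl ih =>
    have hstep : navStep (y, c, m, s) hd =
        (findStep "Y" y hd, findStep "C" c hd, findStep "M" m hd, findStep "S" s hd) := rfl
    simp only [List.foldl_cons, hstep, ih]

-- ===== VERDICT (by name: the statement is the Claim_ definition above) =====
theorem navigation_spec : Claim_equal_navigation := by
  intro seaside _
  unfold Spec_navigation navigation navigation_alt findMark
  rw [foldl_navStep_eq]
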